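-- pv_equiv track=rewrite | github.com/Aaron-C-Abraham/MAPT-RCD | fleet/clustering.py | _find_shared_signals
-- ===== SOURCE A (Python) =====
-- from typing import Dict, List, Optional
--
-- def _find_shared_signals(feature_list: List[dict]) -> dict:
--     """
--     Find signals common to ALL members of a cluster.
--     """
--     if not feature_list:
--         return {}
--
--     shared = {}
--     first = feature_list[0]
--     for key, val in first.items():
--         if val is None or val == "":
--             continue
--         if all(f.get(key) == val for f in feature_list[1:]):
--             shared[key] = str(val)
--     return shared
-- ===== SOURCE B (Python) =====
-- def _find_shared_signals(feature_list):
--     if not feature_list: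
--         return {}
--     n = len(feature_list)
--     counts = {}
--     for f in feature_list:
--         for item in f.items():
--             counts[item] = counts.get(item, 0) + 1
--     return {k: str(v) for k, v in feature_list[0].items()
--             if v is not None and v != "" and counts.get((k, v), 0) == n}
-- ===== Notes on version B (the rewrite author's own statement) =====
-- stated objective: alternative
-- what changed: B drops A's per-key all()-scan of the other members entirely: it builds one counter of (key, value) items over ALL members in a single counting pass, then keeps exactly the non-empty items of the first member whose count equals the number of members.
import Mathlib
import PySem

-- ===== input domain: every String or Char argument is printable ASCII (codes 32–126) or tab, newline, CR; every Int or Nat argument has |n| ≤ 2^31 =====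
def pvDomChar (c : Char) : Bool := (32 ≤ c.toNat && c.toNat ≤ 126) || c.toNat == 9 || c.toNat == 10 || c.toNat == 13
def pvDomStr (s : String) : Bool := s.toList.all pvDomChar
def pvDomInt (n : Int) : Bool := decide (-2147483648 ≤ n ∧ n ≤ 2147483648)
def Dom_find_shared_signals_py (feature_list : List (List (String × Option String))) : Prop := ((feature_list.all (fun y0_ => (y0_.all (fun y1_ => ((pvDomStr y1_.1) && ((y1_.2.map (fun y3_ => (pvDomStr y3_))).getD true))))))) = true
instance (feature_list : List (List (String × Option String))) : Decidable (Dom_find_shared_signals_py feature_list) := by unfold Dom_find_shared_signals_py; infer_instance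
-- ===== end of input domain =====

-- B replaces A's per-key all()-scan of the other members by one counting pass over all
-- members' (key, value) items, then keeps the first member's non-empty items whose count
-- equals the number of members (objective: alternative algorithm).

-- ===== PORT A =====
-- f.get(key) in Python: first-match lookup, none = key absent
def pyLookup (f : List (String × Option String)) (k : String) : Option (Option String) :=
  (PySem.Dict.mk f).get? k

def find_shared_signals_py (feature_list : List (List (String × Option String))) : List (String × String) :=
  match feature_list with
  | [] => []
  | first :: rest =>
      (first.foldl
        (fun shared kv =>
          match kv.2 with
          | none => shared
          | some v =>
              if v = "" then shared
              else if rest.all (fun f => pyLookup f kv.1 == some (some v)) then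
                shared.insert kv.1 v   -- str(val) on a str is the str itself
              else shared)
        PySem.Dict.empty).items

-- ===== PORT B =====
def find_shared_signals_py_alt (feature_list : List (List (String × Option String))) : List (String × String) :=
  match feature_list with
  | [] => []
  | first :: _ =>
      let n : Int := (feature_list.length : Int)
      -- counts[item] = counts.get(item, 0) + 1 over every item of every member
      let counts : PySem.Dict (String × Option String) Int :=
        feature_list.foldl
          (fun d f => f.foldl (fun d x => d.insert x (d.getD x 0 + 1)) d)
          PySem.Dict.empty
      -- {k: str(v) for k, v in feature_list[0].items() if v is not None and v != "" and counts.get((k, v), 0) == n}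
      (first.foldl
        (fun out kv =>
          match kv.2 with
          | none => out
          | some v =>
              if v = "" then out
              else if counts.getD (kv.1, some v) 0 == n then out.insert kv.1 v
              else out)
        PySem.Dict.empty).items

-- ===== PRECONDITION & SPEC =====
-- Pre_ excludes association lists in which some member has duplicate keys: such lists do not
-- correspond to any Python dict (the declared element type of feature_list is dict), so no
-- input expressible on the Python side is excluded.
def Pre_find_shared_signals_py (feature_list : List (List (String × Option String))) : Prop :=
  ∀ f ∈ feature_list, (f.map Prod.fst).Nodup
instance (feature_list : List (List (String × Option String))) : Decidable (Pre_find_shared_signals_py feature_list) := by unfold Pre_find_shared_signals_py; infer_instance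

def pvWitness_find_shared_signals_py : (List (List (String × Option String))) :=
  [[("a", some "x"), ("b", none)], [("a", some "x")]]

def Spec_find_shared_signals_py (feature_list : List (List (String × Option String))) (out : List (String × String)) : Prop := out = find_shared_signals_py_alt feature_list
instance (feature_list : List (List (String × Option String))) (out : List (String × String)) : Decidable (Spec_find_shared_signals_py feature_list out) := by unfold Spec_find_shared_signals_py; infer_instance

-- ===== CLAIM (what is proved, stated in full; the proofs are below) =====
def Claim_equal_find_shared_signals_py : Prop := ∀ (feature_list : List (List (String × Option String))), Dom_find_shared_signals_py feature_list → Pre_find_shared_signals_py feature_list → Spec_find_shared_signals_py feature_list (find_shared_signals_py feature_list)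

-- ===== LEMMAS AND PROOFS =====

-- A fold inserting fresh distinct keys into a dict appends them.
theorem pv_foldl_insert_items (g : String × Option String → Option String)
    (l : List (String × Option String)) (acc : PySem.Dict String String)
    (hnd : (l.map Prod.fst).Nodup)
    (hdisj : ∀ k ∈ l.map Prod.fst, acc.contains k = false) :
    (l.foldl (fun c kv => match g kv with | none => c | some v => c.insert kv.1 v) acc).items
      = acc.items ++ l.filterMap (fun kv => (g kv).map (fun v => (kv.1, v))) := by
  induction l generalizing acc with
  | nil => simp
  | cons kv tl ih =>
    simp only [List.map_cons, List.nodup_cons] at hnd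
    simp only [List.foldl_cons, List.filterMap_cons]
    cases hg : g kv with
    | none =>
      have hdisj' : ∀ k ∈ tl.map Prod.fst, acc.contains k = false :=
        fun k hk => hdisj k (List.mem_cons_of_mem _ hk)
      simp only [Option.map_none]
      rw [ih acc hnd.2 hdisj']
    | some v =>
      have hc : acc.contains kv.1 = false := hdisj kv.1 (by simp)
      have hdisj' : ∀ k ∈ tl.map Prod.fst, (acc.insert kv.1 v).contains k = false := by
        intro k hk
        rw [PySem.Dict.contains_insert]
        have hne : k ≠ kv.1 := fun h => hnd.1 (h ▸ hk)
        simp [hne, hdisj k (List.mem_cons_of_mem _ hk)]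
      simp only [Option.map_some]
      rw [ih (acc.insert kv.1 v) hnd.2 hdisj',
          PySem.Dict.items_insert_of_not_contains (h := hc)]
      simp

-- The nested counting fold: the count of an item is the sum of its occurrences per member.
theorem pv_counts_getD (fl : List (List (String × Option String)))
    (d : PySem.Dict (String × Option String) Int) (p : String × Option String) :
    (fl.foldl (fun d f => f.foldl (fun d x => d.insert x (d.getD x 0 + 1)) d) d).getD p 0
      = d.getD p 0 + (fl.map (fun f => ((f.count p : Nat) : Int))).sum := by
  induction fl generalizing d with
  | nil => simp
  | cons f tl ih =>
    simp only [List.foldl_cons, List.map_cons, List.sum_cons]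
    rw [ih, PySem.Dict.getD_foldl_insert_add_one]
    ring

-- In a member with distinct keys, membership of a pair is first-match lookup.
theorem pv_mem_iff_lookup (f : List (String × Option String))
    (hnd : (f.map Prod.fst).Nodup) (k : String) (v : Option String) :
    (k, v) ∈ f ↔ pyLookup f k = some v := by
  unfold pyLookup
  exact (PySem.Dict.get?_eq_some_iff_mem_items (PySem.Dict.mk f) k v
    (by simpa [PySem.Dict.keys_mk] using hnd)).symm

-- In a member with distinct keys, each pair occurs at most once.
theorem pv_count_le_one (f : List (String × Option String))
    (hnd : (f.map Prod.fst).Nodup) (p : String × Option String) :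
    f.count p ≤ 1 := by
  have hf : f.Nodup := hnd.of_map
  exact (List.nodup_iff_count_le_one.mp hf) p

-- The per-member counts sum to at most the number of members.
theorem pv_sum_le (tl : List (List (String × Option String)))
    (hnd : ∀ f ∈ tl, (f.map Prod.fst).Nodup) (p : String × Option String) :
    (tl.map (fun f => ((f.count p : Nat) : Int))).sum ≤ (tl.length : Int) := by
  induction tl with
  | nil => simp
  | cons f t ih =>
    have h1 : f.count p ≤ 1 := pv_count_le_one f (hnd f (by simp)) p
    have h2 := ih (fun g hg => hnd g (List.mem_cons_of_mem _ hg))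
    simp only [List.map_cons, List.sum_cons, List.length_cons]
    push_cast
    omega

-- The per-member counts sum to the number of members iff every member contains the pair.
theorem pv_sum_eq_iff (rest : List (List (String × Option String)))
    (hnd : ∀ f ∈ rest, (f.map Prod.fst).Nodup) (p : String × Option String) :
    (rest.map (fun f => ((f.count p : Nat) : Int))).sum = (rest.length : Int)
      ↔ ∀ f ∈ rest, p ∈ f := by
  induction rest with
  | nil => simp
  | cons f tl ih =>
    have hf := hnd f (by simp)
    have htl : ∀ g ∈ tl, (g.map Prod.fst).Nodup := fun g hg => hnd g (List.mem_cons_of_mem _ hg)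
    have hle := pv_sum_le tl htl p
    have hge : (0 : Int) ≤ (tl.map (fun f => ((f.count p : Nat) : Int))).sum := by
      apply List.sum_nonneg
      intro x hx
      simp only [List.mem_map] at hx
      obtain ⟨g, _, rfl⟩ := hx
      positivity
    have hc1 : f.count p ≤ 1 := pv_count_le_one f hf p
    have hmem : p ∈ f ↔ 0 < f.count p := List.count_pos_iff.symm
    simp only [List.map_cons, List.sum_cons, List.length_cons, List.forall_mem_cons]
    rw [← ih htl, hmem]
    push_cast
    omega

-- ===== VERDICT (by name: the statement is the Claim_ definition above) =====
theorem find_shared_signals_py_spec : Claim_equal_find_shared_signals_py := by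
  intro fl _ hpre
  unfold Spec_find_shared_signals_py
  cases fl with
  | nil => rfl
  | cons first rest =>
    have hnd : (first.map Prod.fst).Nodup := hpre first (by simp)
    have hndR : ∀ f ∈ rest, (f.map Prod.fst).Nodup :=
      fun f hf => hpre f (List.mem_cons_of_mem _ hf)
    unfold find_shared_signals_py find_shared_signals_py_alt
    simp only
    set counts : PySem.Dict (String × Option String) Int :=
      (first :: rest).foldl
        (fun d f => f.foldl (fun d x => d.insert x (d.getD x 0 + 1)) d)
        PySem.Dict.empty with hcounts
    have hA : (fun (shared : PySem.Dict String String) (kv : String × Option String) =>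
          match kv.2 with
          | none => shared
          | some v =>
              if v = "" then shared
              else if rest.all (fun f => pyLookup f kv.1 == some (some v)) then
                shared.insert kv.1 v
              else shared)
        = (fun c kv => match (match kv.2 with
            | none => none
            | some v => if v = "" then none
                        else if rest.all (fun f => pyLookup f kv.1 == some (some v)) then some v
                        else none : Option String) with
           | none => c | some v => c.insert kv.1 v) := by
      funext c kv
      cases kv.2 with
      | none => rfl
      | some v =>
          by_cases hv : v = ""
          · simp [hv]
          · simp only [if_neg hv]
            split <;> rfl
    have hB : (fun (out : PySem.Dict String String) (kv : String × Option String) =>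
          match kv.2 with
          | none => out
          | some v =>
              if v = "" then out
              else if counts.getD (kv.1, some v) 0 == ((first :: rest).length : Int) then out.insert kv.1 v
              else out)
        = (fun c kv => match (match kv.2 with
            | none => none
            | some v => if v = "" then none
                        else if counts.getD (kv.1, some v) 0 == ((first :: rest).length : Int) then some v
                        else none : Option String) with
           | none => c | some v => c.insert kv.1 v) := by
      funext c kv
      cases kv.2 with
      | none => rfl
      | some v =>
          by_cases hv : v = ""
          · simp [hv]
          · simp only [if_neg hv]
            split <;> rfl
    rw [hA, hB,
        pv_foldl_insert_items _ _ _ hnd (by simp [PySem.Dict.contains_empty]),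
        pv_foldl_insert_items _ _ _ hnd (by simp [PySem.Dict.contains_empty])]
    simp only [PySem.Dict.empty]
    congr 1
    apply List.filterMap_congr
    intro kv hkv
    cases hv : kv.2 with
    | none => simp
    | some v =>
      by_cases he : v = ""
      · simp [he]
      · have hkvp : kv = (kv.1, some v) := by rw [← hv]
        have hcond : (counts.getD (kv.1, some v) 0 == ((first :: rest).length : Int))
            = rest.all (fun f => pyLookup f kv.1 == some (some v)) := by
          rw [Bool.eq_iff_iff, beq_iff_eq, List.all_eq_true]
          have hmemf : (kv.1, some v) ∈ first := hkvp ▸ hkv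
          have hcf : first.count (kv.1, some v) = 1 := by
            have h1 := pv_count_le_one first hnd (kv.1, some v)
            have h2 : 0 < first.count (kv.1, some v) := List.count_pos_iff.mpr hmemf
            omega
          rw [hcounts, pv_counts_getD]
          simp only [PySem.Dict.getD_empty, List.map_cons, List.sum_cons, hcf,
            List.length_cons]
          constructor
          · intro h f hf
            have hs : (rest.map (fun f => ((f.count (kv.1, some v) : Nat) : Int))).sum
                = (rest.length : Int) := by push_cast at h ⊢; omega
            have := (pv_sum_eq_iff rest hndR (kv.1, some v)).mp hs f hf
            exact beq_iff_eq.mpr ((pv_mem_iff_lookup f (hndR f hf) kv.1 (some v)).mp this)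
          · intro h
            have hall : ∀ f ∈ rest, (kv.1, some v) ∈ f := by
              intro f hf
              exact (pv_mem_iff_lookup f (hndR f hf) kv.1 (some v)).mpr (beq_iff_eq.mp (h f hf))
            have hs := (pv_sum_eq_iff rest hndR (kv.1, some v)).mpr hall
            push_cast at hs ⊢
            omega
        simp only [if_neg he, hcond]
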